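-- pv_equiv track=rewrite | github.com/alantandrea/medical_triage_pipeline | medical_reports-service/scripts/seed_real_images.py | resolve_xray_severity
-- ===== SOURCE A (Python) =====
-- XRAY_FINDING_TO_SEVERITY = {
--     "No Finding":          "normal",
--     "Atelectasis":         "minor",
--     "Cardiomegaly":        "critical",
--     "Effusion":            "minor",
--     "Infiltration":        "minor",
--     "Mass":                "major",
--     "Nodule":              "major",
--     "Pneumonia":           "major",
--     "Pneumothorax":        "critical",
--     "Consolidation":       "major",
--     "Edema":               "critical",
--     "Emphysema":           "minor",
--     "Fibrosis":            "minor",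
--     "Pleural_Thickening":  "minor",
--     "Hernia":              "minor",
-- }
--
-- SEVERITY_PRIORITY = {"normal": 0, "minor": 1, "major": 2, "critical": 3}
--
-- def resolve_xray_severity(labels):
--     """Resolve multi-label X-ray findings to most severe."""
--     if not labels:
--         return None, None
--     best_severity = "normal"
--     best_finding = "No Finding"
--     for label_name in labels:
--         label_name = label_name.strip()
--         severity = XRAY_FINDING_TO_SEVERITY.get(label_name, "normal")
--         if SEVERITY_PRIORITY.get(severity, 0) > SEVERITY_PRIORITY.get(best_severity, 0):
--             best_severity = severity
--             best_finding = label_name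
--     return best_finding, best_severity
-- ===== SOURCE B (Python) =====
-- XRAY_FINDING_TO_SEVERITY = {
--     "No Finding":          "normal",
--     "Atelectasis":         "minor",
--     "Cardiomegaly":        "critical",
--     "Effusion":            "minor",
--     "Infiltration":        "minor",
--     "Mass":                "major",
--     "Nodule":              "major",
--     "Pneumonia":           "major",
--     "Pneumothorax":        "critical",
--     "Consolidation":       "major",
--     "Edema":               "critical",
--     "Emphysema":           "minor",
--     "Fibrosis":            "minor",
--     "Pleural_Thickening":  "minor",
--     "Hernia":              "minor",
-- }
--
-- def resolve_xray_severity(labels):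
--     """Resolve multi-label X-ray findings to most severe."""
--     if not labels:
--         return None, None
--     index = {}
--     for name in labels:
--         name = name.strip()
--         sev = XRAY_FINDING_TO_SEVERITY.get(name, "normal")
--         if sev not in index:
--             index[sev] = name
--     for sev in ("critical", "major", "minor"):
--         if sev in index:
--             return index[sev], sev
--     return "No Finding", "normal"
-- ===== Notes on version B (the rewrite author's own statement) =====
-- stated objective: idiomatic
-- what changed: Replaces the running best-so-far comparison loop with a first-seen-per-severity index dict built in one pass, then a priority-descending scan over the three severity names.
import Mathlib
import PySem

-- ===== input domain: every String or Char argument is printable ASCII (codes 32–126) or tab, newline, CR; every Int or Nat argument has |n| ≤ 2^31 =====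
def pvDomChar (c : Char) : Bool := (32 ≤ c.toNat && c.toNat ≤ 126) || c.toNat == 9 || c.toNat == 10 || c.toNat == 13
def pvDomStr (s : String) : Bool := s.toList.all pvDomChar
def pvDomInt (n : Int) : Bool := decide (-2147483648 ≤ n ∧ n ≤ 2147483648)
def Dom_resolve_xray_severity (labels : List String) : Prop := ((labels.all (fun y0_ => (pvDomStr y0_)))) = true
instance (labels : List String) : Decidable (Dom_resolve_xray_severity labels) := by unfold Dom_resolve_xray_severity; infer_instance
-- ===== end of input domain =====

-- B replaces A's running best-so-far comparison with a first-seen-per-severity index built in one pass,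
-- then a priority-descending scan over the three severity names (idiomatic; same cost).


-- ===== PORT A =====
def xrayTable : PySem.Dict String String := PySem.Dict.mk
  [("No Finding", "normal"), ("Atelectasis", "minor"), ("Cardiomegaly", "critical"),
   ("Effusion", "minor"), ("Infiltration", "minor"), ("Mass", "major"), ("Nodule", "major"),
   ("Pneumonia", "major"), ("Pneumothorax", "critical"), ("Consolidation", "major"),
   ("Edema", "critical"), ("Emphysema", "minor"), ("Fibrosis", "minor"),
   ("Pleural_Thickening", "minor"), ("Hernia", "minor")]

def sevPrio : PySem.Dict String Int := PySem.Dict.mk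
  [("normal", 0), ("minor", 1), ("major", 2), ("critical", 3)]

-- A's loop body: update (best_finding, best_severity) if the label's severity is strictly higher
def stepA (st : String × String) (label_name : String) : String × String :=
  let label_name := PySem.Str.strip label_name
  let severity := xrayTable.getD label_name "normal"
  if sevPrio.getD severity 0 > sevPrio.getD st.2 0 then (label_name, severity) else st

def resolve_xray_severity (labels : List String) : Option String × Option String :=
  if labels = [] then (none, none)
  else
    let st := labels.foldl stepA ("No Finding", "normal")
    (some st.1, some st.2)

-- ===== PORT B =====
-- B's loop body: record the first stripped name seen at each severity
def stepB (d : PySem.Dict String String) (name : String) : PySem.Dict String String :=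
  let name := PySem.Str.strip name
  let sev := xrayTable.getD name "normal"
  if d.contains sev then d else d.insert sev name

-- the final for-loop with early return over ("critical", "major", "minor")
def pickFirst (index : PySem.Dict String String) : List String → Option String × Option String
  | [] => (some "No Finding", some "normal")
  | s :: rest =>
    match index.get? s with
    | some n => (some n, some s)
    | none => pickFirst index rest

def resolve_xray_severity_alt (labels : List String) : Option String × Option String :=
  if labels = [] then (none, none)
  else
    let index := labels.foldl stepB PySem.Dict.empty
    pickFirst index ["critical", "major", "minor"]

-- ===== PRECONDITION & SPEC =====
def Spec_resolve_xray_severity (labels : List String) (out : Option String × Option String) : Prop := out = resolve_xray_severity_alt labels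
instance (labels : List String) (out : Option String × Option String) : Decidable (Spec_resolve_xray_severity labels out) := by unfold Spec_resolve_xray_severity; infer_instance

-- ===== CLAIM (what is proved, stated in full; the proofs are below) =====
def Claim_equal_resolve_xray_severity : Prop := ∀ (labels : List String), Dom_resolve_xray_severity labels → Spec_resolve_xray_severity labels (resolve_xray_severity labels)

-- ===== LEMMAS AND PROOFS =====

-- the invariant linking A's running best (bf, bs) with B's index dict
def pvInv (bf bs : String) (d : PySem.Dict String String) : Prop :=
  (bs = "normal" ∨ bs = "minor" ∨ bs = "major" ∨ bs = "critical") ∧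
  (bs = "normal" → bf = "No Finding" ∧ d.get? "critical" = none ∧ d.get? "major" = none ∧ d.get? "minor" = none) ∧
  (bs = "minor" → d.get? "critical" = none ∧ d.get? "major" = none ∧ d.get? "minor" = some bf) ∧
  (bs = "major" → d.get? "critical" = none ∧ d.get? "major" = some bf) ∧
  (bs = "critical" → d.get? "critical" = some bf)

lemma getD_mk_mem (kvs : List (String × String)) (n dflt : String) :
    (PySem.Dict.mk kvs).getD n dflt = dflt ∨ (PySem.Dict.mk kvs).getD n dflt ∈ kvs.map Prod.snd := by
  induction kvs with
  | nil =>
    left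
    simp [show PySem.Dict.mk ([] : List (String × String)) = PySem.Dict.empty from rfl,
      PySem.Dict.getD_empty]
  | cons p rest ih =>
    obtain ⟨k, v⟩ := p
    rw [PySem.Dict.getD_eq_get?_getD, PySem.Dict.get?_mk_cons]
    by_cases h : (k == n) = true
    · right; simp [h]
    · rw [if_neg h, ← PySem.Dict.getD_eq_get?_getD]
      rcases ih with ih | ih
      · left; exact ih
      · right; simp [ih]

lemma sev_mem (l : String) :
    xrayTable.getD (PySem.Str.strip l) "normal" = "normal" ∨
    xrayTable.getD (PySem.Str.strip l) "normal" = "minor" ∨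
    xrayTable.getD (PySem.Str.strip l) "normal" = "major" ∨
    xrayTable.getD (PySem.Str.strip l) "normal" = "critical" := by
  have h := getD_mk_mem
    [("No Finding", "normal"), ("Atelectasis", "minor"), ("Cardiomegaly", "critical"),
     ("Effusion", "minor"), ("Infiltration", "minor"), ("Mass", "major"), ("Nodule", "major"),
     ("Pneumonia", "major"), ("Pneumothorax", "critical"), ("Consolidation", "major"),
     ("Edema", "critical"), ("Emphysema", "minor"), ("Fibrosis", "minor"),
     ("Pleural_Thickening", "minor"), ("Hernia", "minor")] (PySem.Str.strip l) "normal"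
  rw [show xrayTable = PySem.Dict.mk
    [("No Finding", "normal"), ("Atelectasis", "minor"), ("Cardiomegaly", "critical"),
     ("Effusion", "minor"), ("Infiltration", "minor"), ("Mass", "major"), ("Nodule", "major"),
     ("Pneumonia", "major"), ("Pneumothorax", "critical"), ("Consolidation", "major"),
     ("Edema", "critical"), ("Emphysema", "minor"), ("Fibrosis", "minor"),
     ("Pleural_Thickening", "minor"), ("Hernia", "minor")] from rfl]
  rcases h with h | h
  · left; exact h
  · simp only [List.map, List.mem_cons, List.not_mem_nil, or_false] at h
    rcases h with h | h | h | h | h | h | h | h | h | h | h | h | h | h | h <;> simp [h]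

set_option maxHeartbeats 1600000 in
lemma inv_step (bf bs : String) (d : PySem.Dict String String) (l : String)
    (h : pvInv bf bs d) :
    pvInv (stepA (bf, bs) l).1 (stepA (bf, bs) l).2 (stepB d l) := by
  obtain ⟨h0, hn, h1, h2, h3⟩ := h
  have hs := sev_mem l
  simp only [stepA, stepB]
  rcases hs with hs | hs | hs | hs <;> rw [hs] <;>
    rcases h0 with h0 | h0 | h0 | h0 <;> subst h0 <;>
    simp_all [pvInv, PySem.Dict.contains_eq_isSome_get?, sevPrio,
      PySem.Dict.getD_eq_get?_getD, PySem.Dict.get?_mk_cons, PySem.Dict.get?_insert] <;>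
    split_ifs <;> simp_all [PySem.Dict.get?_insert]

lemma loop_eq : ∀ (ls : List String) (bf bs : String) (d : PySem.Dict String String),
    pvInv bf bs d →
    pickFirst (ls.foldl stepB d) ["critical", "major", "minor"] =
      (some (ls.foldl stepA (bf, bs)).1, some (ls.foldl stepA (bf, bs)).2) := by
  intro ls
  induction ls with
  | nil =>
    intro bf bs d h
    obtain ⟨h0, hn, h1, h2, h3⟩ := h
    rcases h0 with h0 | h0 | h0 | h0 <;> subst h0 <;>
      simp_all [pickFirst]
  | cons l ls ih =>
    intro bf bs d h
    have h' := inv_step bf bs d l h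
    simpa [List.foldl_cons] using ih (stepA (bf, bs) l).1 (stepA (bf, bs) l).2 (stepB d l) h'

lemma inv_init : pvInv "No Finding" "normal" PySem.Dict.empty := by
  simp [pvInv, PySem.Dict.get?_empty]

-- ===== VERDICT (by name: the statement is the Claim_ definition above) =====
theorem resolve_xray_severity_spec : Claim_equal_resolve_xray_severity := by
  intro labels _
  unfold Spec_resolve_xray_severity resolve_xray_severity resolve_xray_severity_alt
  by_cases hemp : labels = []
  · simp [hemp]
  · simp only [if_neg hemp]
    exact (loop_eq labels "No Finding" "normal" PySem.Dict.empty inv_init).symm
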